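-- pv_equiv track=rewrite | github.com/Regata3010/AI-CodeBugger | backend/core/chains/conversational.py | assess_conversation_complexity
-- ===== SOURCE A (Python) =====
-- def assess_conversation_complexity(code: str) -> str:
--     """Assess appropriate conversation depth"""
--     lines = len([line for line in code.split('\n') if line.strip()])
--     functions = code.count('def ')
--     classes = code.count('class ')
--
--     complexity_score = lines + (functions * 2) + (classes * 3)
--
--     if complexity_score < 20:
--         return 'beginner'
--     elif complexity_score < 50:
--         return 'intermediate'
--     else:
--         return 'advanced'
-- ===== SOURCE B (Python) =====
-- def assess_conversation_complexity(code: str) -> str: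
--     """Assess appropriate conversation depth"""
--     score = 0
--     pending = False  # current line has a non-whitespace character
--     for i, ch in enumerate(code):
--         if ch == '\n':
--             if pending:
--                 score += 1
--             pending = False
--         elif not ch.isspace():
--             pending = True
--         if code.startswith('def ', i):
--             score += 2
--         if code.startswith('class ', i):
--             score += 3
--     if pending:
--         score += 1
--     if score < 20:
--         return 'beginner'
--     if score < 50:
--         return 'intermediate'
--     return 'advanced'
-- ===== Notes on version B (the rewrite author's own statement) =====
-- stated objective: alternative
-- what changed: B replaces A's three whole-string library passes (split on newlines plus a blank-line filter, and two substring-count scans) by a single character-indexed state machine: one enumerate loop over the string that flushes a pending nonblank-line flag at each newline and adds the function/class weights whenever the corresponding keyword starts at the current index.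
import Mathlib
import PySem

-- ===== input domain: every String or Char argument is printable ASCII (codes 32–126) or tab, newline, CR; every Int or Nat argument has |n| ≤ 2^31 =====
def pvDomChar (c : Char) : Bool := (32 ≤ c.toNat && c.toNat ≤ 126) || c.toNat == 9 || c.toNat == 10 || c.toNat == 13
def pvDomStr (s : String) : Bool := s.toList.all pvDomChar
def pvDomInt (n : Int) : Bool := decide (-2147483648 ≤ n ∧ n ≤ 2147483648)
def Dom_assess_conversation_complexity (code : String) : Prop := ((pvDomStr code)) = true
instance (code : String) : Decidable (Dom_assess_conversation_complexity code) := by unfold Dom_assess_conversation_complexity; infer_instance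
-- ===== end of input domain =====

-- B replaces A's three whole-string library passes (split/filter, two .count scans) by one
-- character-indexed state machine over the string (objective: alternative; same O(n) cost).

-- ===== PORT A =====
-- code.split('\n') with the nonempty literal separator is exactly Chars.splitOn;
-- 'if line.strip()' (truthiness) is 'stripped list ≠ []'.
def assess_conversation_complexity (code : String) : String :=
  let lines : Nat :=
    ((PySem.Chars.splitOn code.toList ['\n']).filter
      (fun line => !(PySem.Chars.strip line).isEmpty)).length
  let functions : Nat := PySem.Str.count code "def "
  let classes : Nat := PySem.Str.count code "class "
  let complexity_score : Int := (lines : Int) + (functions : Int) * 2 + (classes : Int) * 3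
  if complexity_score < 20 then "beginner"
  else if complexity_score < 50 then "intermediate"
  else "advanced"

-- ===== PORT B =====
-- B's single indexed loop 'for i, ch in enumerate(code)': structural recursion on the suffix
-- starting at i; code.startswith('def ', i) is isPrefixOf on that suffix (exact: pattern past
-- the end is no match); ch.isspace() is PySem.Chars.isspace.
def pvScan : List Char → Int → Bool → Int
  | [], score, pending => if pending then score + 1 else score
  | c :: rest, score, pending =>
    let score1 : Int := if c = '\n' then (if pending then score + 1 else score) else score
    let pending1 : Bool := if c = '\n' then false else (pending || !(PySem.Chars.isspace c))
    let score2 : Int := score1 + (if List.isPrefixOf ['d','e','f',' '] (c :: rest) then 2 else 0)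
    let score3 : Int := score2 + (if List.isPrefixOf ['c','l','a','s','s',' '] (c :: rest) then 3 else 0)
    pvScan rest score3 pending1

def assess_conversation_complexity_alt (code : String) : String :=
  let score : Int := pvScan code.toList 0 false
  if score < 20 then "beginner"
  else if score < 50 then "intermediate"
  else "advanced"

-- ===== PRECONDITION & SPEC =====
def Spec_assess_conversation_complexity (code : String) (out : String) : Prop := out = assess_conversation_complexity_alt code
instance (code : String) (out : String) : Decidable (Spec_assess_conversation_complexity code out) := by unfold Spec_assess_conversation_complexity; infer_instance

-- ===== CLAIM (what is proved, stated in full; the proofs are below) =====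
def Claim_equal_assess_conversation_complexity : Prop := ∀ (code : String), Dom_assess_conversation_complexity code → Spec_assess_conversation_complexity code (assess_conversation_complexity code)

-- ===== LEMMAS AND PROOFS =====

-- number of positions at which `sub` occurs (B's per-index startswith view)
def pvPos (sub : List Char) : List Char → Nat
  | [] => 0
  | c :: rest => (if List.isPrefixOf sub (c :: rest) then 1 else 0) + pvPos sub rest

-- number of non-blank lines seen by B's pending-flag machine, starting with flag p
def pvPend : List Char → Bool → Int
  | [], p => if p then 1 else 0
  | c :: rest, p =>
    if c = '\n' then (if p then 1 else 0) + pvPend rest false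
    else pvPend rest (p || !(PySem.Chars.isspace c))

-- count.go only adds to its accumulator
theorem pv_count_go_shift (sub : List Char) (fuel : Nat) :
    ∀ (l : List Char) (a : Nat),
      PySem.Chars.count.go sub fuel l a = a + PySem.Chars.count.go sub fuel l 0 := by
  induction fuel with
  | zero =>
    intro l a
    cases l <;> rfl
  | succ fuel ih =>
    intro l a
    cases l with
    | nil => rfl
    | cons c rest =>
      rw [PySem.Chars.count.go.eq_def]
      conv_rhs => rw [PySem.Chars.count.go.eq_def]
      simp only
      split
      · rw [ih _ (a + 1), ih _ (0 + 1)]; omega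
      · exact ih rest a

-- count.go is fuel-insensitive once fuel ≥ length (sub nonempty)
theorem pv_count_go_fuel_aux (sub : List Char) (hsub : sub ≠ []) :
    ∀ (n : Nat) (l : List Char), l.length ≤ n → ∀ (fuel : Nat), l.length ≤ fuel → ∀ (a : Nat),
      PySem.Chars.count.go sub fuel l a = PySem.Chars.count.go sub l.length l a := by
  intro n
  induction n with
  | zero =>
    intro l hl fuel hf a
    have : l = [] := List.eq_nil_of_length_eq_zero (by omega)
    subst this
    rw [PySem.Chars.count.go.eq_def]
    conv_rhs => rw [PySem.Chars.count.go.eq_def]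
    cases fuel <;> rfl
  | succ n ihn =>
    intro l hl fuel hf a
    cases l with
    | nil =>
      rw [PySem.Chars.count.go.eq_def]
      conv_rhs => rw [PySem.Chars.count.go.eq_def]
      cases fuel <;> rfl
    | cons c rest =>
      obtain ⟨f, rfl⟩ : ∃ f, fuel = f + 1 := by
        cases fuel with
        | zero => simp at hf
        | succ f => exact ⟨f, rfl⟩
      rw [PySem.Chars.count.go.eq_def]
      conv_rhs => rw [show (c :: rest).length = rest.length + 1 from rfl,
        PySem.Chars.count.go.eq_def]
      simp only
      split
      · rename_i hpre
        have hle : sub.length ≤ (c :: rest).length :=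
          (List.isPrefixOf_iff_prefix.mp hpre).length_le
        have hpos : 0 < sub.length := List.length_pos_of_ne_nil hsub
        have hlen : (List.drop sub.length (c :: rest)).length ≤ rest.length := by
          simp only [List.length_drop, List.length_cons] at *
          omega
        have hrest : rest.length ≤ n := by simp at hl; omega
        rw [ihn _ (Nat.le_trans hlen hrest) f (by simp at hf; omega) (a + 1),
          ihn _ (Nat.le_trans hlen hrest) rest.length hlen (a + 1)]
      · have hrest : rest.length ≤ n := by simp at hl; omega
        rw [ihn rest hrest f (by simp at hf; omega) a,
          ihn rest hrest rest.length (le_refl _) a]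

theorem pv_count_go_fuel (sub : List Char) (hsub : sub ≠ [])
    (l : List Char) (fuel : Nat) (hf : l.length ≤ fuel) (a : Nat) :
    PySem.Chars.count.go sub fuel l a = PySem.Chars.count.go sub l.length l a :=
  pv_count_go_fuel_aux sub hsub l.length l (le_refl _) fuel hf a

-- no occurrence of d::tl can start inside a block of characters that are all ≠ d
theorem pvPos_append_of_ne (d : Char) (tl : List Char) :
    ∀ (pre t : List Char), (∀ c ∈ pre, c ≠ d) → pvPos (d :: tl) (pre ++ t) = pvPos (d :: tl) t := by
  intro pre
  induction pre with
  | nil => intro t _; rfl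
  | cons c pre ih =>
    intro t h
    have hc : c ≠ d := h c (by simp)
    rw [List.cons_append, pvPos]
    rw [if_neg (by simp [List.isPrefixOf]; intro hdc; exact absurd hdc.symm hc)]
    simpa using ih t (fun x hx => h x (by simp [hx]))

-- Python's non-overlapping count equals B's all-positions count when the pattern's
-- first character does not recur inside the pattern
theorem pv_count_eq_pvPos_aux (d : Char) (tl : List Char) (htl : ∀ c ∈ tl, c ≠ d) :
    ∀ (n : Nat) (l : List Char), l.length ≤ n →
      PySem.Chars.count.go (d :: tl) l.length l 0 = pvPos (d :: tl) l := by
  intro n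
  induction n with
  | zero =>
    intro l hl
    have : l = [] := List.eq_nil_of_length_eq_zero (by omega)
    subst this; rfl
  | succ n ihn =>
    intro l hl
    cases l with
    | nil => rfl
    | cons c rest =>
      rw [show (c :: rest).length = rest.length + 1 from rfl, PySem.Chars.count.go.eq_def]
      simp only
      split
      · rename_i hpre
        -- a match: c = d and rest = tl ++ t
        have hpfx : d :: tl <+: c :: rest := List.isPrefixOf_iff_prefix.mp hpre
        obtain ⟨t, ht⟩ := hpfx
        rw [List.cons_append] at ht
        obtain ⟨hcd, hrest⟩ := List.cons_eq_cons.mp ht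
        subst hcd; subst hrest
        have hdrop : List.drop (d :: tl).length (d :: (tl ++ t)) = t := by
          simp [List.length_cons]
        rw [hdrop]
        have htlen : t.length ≤ tl.length + t.length := by omega
        have hlenrest : (tl ++ t).length = tl.length + t.length := List.length_append
        rw [hlenrest, pv_count_go_fuel _ (by simp) t (tl.length + t.length) htlen,
          pv_count_go_shift]
        have htn : t.length ≤ n := by simp [List.length_append] at hl; omega
        rw [ihn t htn]
        rw [pvPos, if_pos hpre, pvPos_append_of_ne d tl tl t htl]
      · rename_i hpre
        have hrest : rest.length ≤ n := by simp at hl; omega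
        rw [pv_count_go_fuel _ (by simp) rest (rest.length) (le_refl _)]
        rw [ihn rest hrest]
        rw [pvPos, if_neg hpre]
        omega

theorem pv_strip_eq_nil_iff (l : List Char) :
    PySem.Chars.strip l = [] ↔ l.all PySem.Chars.isspace = true := by
  unfold PySem.Chars.strip PySem.Chars.rstrip PySem.Chars.lstrip
  constructor
  · intro h
    rw [List.reverse_eq_nil_iff, List.dropWhile_eq_nil_iff] at h
    have hdw : ∀ a ∈ List.dropWhile PySem.Chars.isspace l, PySem.Chars.isspace a := by
      intro a ha
      exact h a (List.mem_reverse.mpr ha)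
    rw [List.all_eq_true]
    intro a ha
    rcases List.mem_append.mp ((List.takeWhile_append_dropWhile (p := PySem.Chars.isspace) (l := l)) ▸ ha) with h1 | h2
    · exact List.mem_takeWhile_imp h1
    · exact hdw a h2
  · intro h
    rw [List.all_eq_true] at h
    rw [List.reverse_eq_nil_iff, List.dropWhile_eq_nil_iff]
    intro a ha
    exact h a ((List.dropWhile_sublist _).subset (List.mem_reverse.mp ha))

-- a finished piece cur.reverse is non-blank exactly when the pending flag is set
theorem pv_filter_flag (cur : List Char) :
    (!(PySem.Chars.strip cur.reverse).isEmpty) = !(cur.all PySem.Chars.isspace) := by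
  cases hc : cur.all PySem.Chars.isspace with
  | true =>
    have h0 : PySem.Chars.strip cur.reverse = [] :=
      (pv_strip_eq_nil_iff cur.reverse).mpr (by simp [List.all_reverse, hc])
    simp [h0]
  | false =>
    have hne : PySem.Chars.strip cur.reverse ≠ [] := by
      intro hnil
      have := (pv_strip_eq_nil_iff cur.reverse).mp hnil
      simp [List.all_reverse, hc] at this
    simp [hne]

-- the splitOn/filter line count equals B's pending-flag machine
theorem pv_split_filter_eq_pvPend (l : List Char) :
    ((((PySem.Chars.splitOn l ['\n']).filter
        (fun line => !(PySem.Chars.strip line).isEmpty)).length : Int))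
      = pvPend l false := by
  have key : ∀ (fuel : Nat) (l : List Char), l.length < fuel → ∀ (cur : List Char) (acc : List (List Char)),
      (((PySem.Chars.splitOn.go ['\n'] fuel l cur acc).filter
          (fun line => !(PySem.Chars.strip line).isEmpty)).length : Int)
        = ((acc.filter (fun line => !(PySem.Chars.strip line).isEmpty)).length : Int)
            + pvPend l (!(cur.all PySem.Chars.isspace)) := by
    intro fuel
    induction fuel with
    | zero => intro l hl; omega
    | succ fuel ih =>
      intro l hl cur acc
      cases l with
      | nil =>
        rw [PySem.Chars.splitOn.go.eq_def]
        simp only [List.filter_reverse, List.length_reverse, List.filter_cons]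
        rw [pv_filter_flag cur, pvPend]
        cases cur.all PySem.Chars.isspace <;> simp
      | cons c rest =>
        rw [PySem.Chars.splitOn.go.eq_def]
        simp only
        by_cases hc : c = '\n'
        · subst hc
          rw [if_pos (by simp [List.isPrefixOf])]
          have : List.drop (['\n'].length) ('\n' :: rest) = rest := by simp
          rw [this, ih rest (by simp at hl; omega) [] ((cur.reverse) :: acc)]
          rw [pvPend, if_pos rfl]
          simp only [List.filter_cons]
          rw [pv_filter_flag cur]
          cases cur.all PySem.Chars.isspace
          · simp
            omega
          · simp
        · rw [if_neg (by simp [List.isPrefixOf]; exact fun h => absurd h.symm hc)]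
          rw [ih rest (by simp at hl; omega) (c :: cur) acc]
          rw [pvPend, if_neg hc]
          have : (!((c :: cur).all PySem.Chars.isspace))
              = ((!(cur.all PySem.Chars.isspace)) || !(PySem.Chars.isspace c)) := by
            cases hcs : PySem.Chars.isspace c <;>
              cases hca : cur.all PySem.Chars.isspace <;> simp [hcs, hca]
          rw [this]
  unfold PySem.Chars.splitOn
  rw [key (l.length + 1) l (by omega) [] []]
  simp

-- closed form of B's scan
theorem pvScan_eq (l : List Char) :
    ∀ (score : Int) (pending : Bool),
      pvScan l score pending
        = score + pvPend l pending
          + 2 * (pvPos ['d','e','f',' '] l : Int) + 3 * (pvPos ['c','l','a','s','s',' '] l : Int) := by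
  induction l with
  | nil =>
    intro score pending
    cases pending <;> norm_num [pvScan, pvPend, pvPos]
  | cons c rest ih =>
    intro score pending
    simp only [pvScan]
    rw [ih]
    rw [pvPend, pvPos, pvPos]
    split_ifs <;> push_cast <;> ring

-- ===== VERDICT (by name: the statement is the Claim_ definition above) =====
set_option maxRecDepth 8192 in
theorem assess_conversation_complexity_spec : Claim_equal_assess_conversation_complexity := by
  intro code _
  unfold Spec_assess_conversation_complexity assess_conversation_complexity
    assess_conversation_complexity_alt
  have hscore :
      ((((PySem.Chars.splitOn code.toList ['\n']).filter
           (fun line => !(PySem.Chars.strip line).isEmpty)).length : Int)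
        + (PySem.Str.count code "def " : Int) * 2 + (PySem.Str.count code "class " : Int) * 3)
      = pvScan code.toList 0 false := by
    rw [pvScan_eq code.toList 0 false]
    rw [pv_split_filter_eq_pvPend code.toList]
    have hdef : PySem.Str.count code "def " = pvPos ['d','e','f',' '] code.toList := by
      rw [PySem.Str.count_eq]
      show PySem.Chars.count code.toList ['d','e','f',' '] = _
      unfold PySem.Chars.count
      rw [if_neg (by simp)]
      exact pv_count_eq_pvPos_aux 'd' ['e','f',' '] (by simp)
        code.toList.length code.toList (le_refl _)
    have hcls : PySem.Str.count code "class " = pvPos ['c','l','a','s','s',' '] code.toList := by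
      rw [PySem.Str.count_eq]
      show PySem.Chars.count code.toList ['c','l','a','s','s',' '] = _
      unfold PySem.Chars.count
      rw [if_neg (by simp)]
      exact pv_count_eq_pvPos_aux 'c' ['l','a','s','s',' '] (by simp)
        code.toList.length code.toList (le_refl _)
    rw [hdef, hcls]
    ring
  simp only [← hscore]
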